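-- pv_equiv track=rewrite | github.com/azsgws/emgraph-test | graph/investigate_pagerank_minus_auth_ranking.py | calc_displacement_in_all_version_ranking_down
-- ===== SOURCE A (Python) =====
-- def calc_displacement_in_all_version_ranking_down(node2ranking_each_mml_version):
--     node2ranking = dict()
--     node2score = dict()
--
--     for version in node2ranking_each_mml_version.keys():
--         for k,v in node2ranking_each_mml_version[version].items():
--             if not k in node2ranking.keys():
--                 node2ranking[k] = dict()
--                 node2ranking[k][0] = dict()
--                 node2ranking[k][0]["min"] = v
--                 node2ranking[k][0]["max"] = v
--             else:
--                 key_max = max(node2ranking[k].keys())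
--                 if v < node2ranking[k][key_max]["min"]:
--                     node2ranking[k][key_max + 1] = dict()
--                     node2ranking[k][key_max + 1]["min"] = v
--                     node2ranking[k][key_max + 1]["max"] = v
--                 else:
--                     node2ranking[k][key_max]["max"] = max(v, node2ranking[k][key_max]["max"])
--
--     for k in node2ranking.keys():
--         for i in node2ranking[k].keys():
--             for j in range(i, len(node2ranking[k].keys())):
--                 if not k in node2score.keys():
--                     node2score[k] = node2ranking[k][i]["min"] - node2ranking[k][j]["max"]
--                 else:
--                     node2score[k] = min(node2score[k], node2ranking[k][i]["min"] - node2ranking[k][j]["max"])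
--     return node2score
-- ===== SOURCE B (Python) =====
-- def _group_values(node2ranking_each_mml_version):
--     node2vals = dict()
--     for ranking in node2ranking_each_mml_version.values():
--         for k, v in ranking.items():
--             node2vals.setdefault(k, []).append(v)
--     return node2vals
--
--
-- def _segments(vals):
--     # maximal runs in which every value stays >= the run's first value
--     segs = []
--     for v in vals:
--         if segs and v >= segs[-1][0]:
--             if v > segs[-1][1]:
--                 segs[-1] = (segs[-1][0], v)
--         else:
--             segs.append((v, v))
--     return segs
--
--
-- def _best_displacement(segs):
--     # min over i <= j of segs[i].min - segs[j].max, one forward pass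
--     best = None
--     prefmin = None
--     for mn, mx in segs:
--         prefmin = mn if prefmin is None else min(prefmin, mn)
--         d = prefmin - mx
--         best = d if best is None else min(best, d)
--     return best
--
--
-- def calc_displacement_in_all_version_ranking_down(node2ranking_each_mml_version):
--     node2score = dict()
--     for k, vals in _group_values(node2ranking_each_mml_version).items():
--         node2score[k] = _best_displacement(_segments(vals))
--     return node2score
-- ===== Notes on version B (the rewrite author's own statement) =====
-- stated objective: faster
-- what changed: B groups each node's values once, rebuilds the descending runs as a plain list, and gets min over i<=j of run[i].min - run[j].max in ONE forward pass with a running prefix-min, instead of A's nested dict-of-dicts with max(keys) recomputed per value and a quadratic double loop over run pairs.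
import Mathlib
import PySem

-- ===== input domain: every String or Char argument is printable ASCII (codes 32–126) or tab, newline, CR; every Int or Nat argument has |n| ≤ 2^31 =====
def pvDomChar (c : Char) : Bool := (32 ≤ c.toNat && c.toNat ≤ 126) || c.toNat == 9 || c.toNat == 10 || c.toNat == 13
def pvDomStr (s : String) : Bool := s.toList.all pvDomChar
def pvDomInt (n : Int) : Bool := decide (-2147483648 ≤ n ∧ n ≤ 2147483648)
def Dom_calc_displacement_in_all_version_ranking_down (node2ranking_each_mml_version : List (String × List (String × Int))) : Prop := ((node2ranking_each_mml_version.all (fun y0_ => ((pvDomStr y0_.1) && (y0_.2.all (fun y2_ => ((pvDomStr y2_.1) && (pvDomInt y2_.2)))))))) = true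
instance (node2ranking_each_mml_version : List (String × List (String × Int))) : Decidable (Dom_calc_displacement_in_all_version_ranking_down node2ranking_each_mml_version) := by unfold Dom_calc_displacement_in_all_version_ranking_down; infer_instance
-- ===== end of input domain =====

-- B replaces A's nested dict-of-dicts (with max(keys) recomputed per value and a quadratic
-- double loop over run pairs) by a run list built in one pass and a single forward pass with a
-- running prefix-min; the equivalence proved is about the return value only.

-- ===== PORT A =====
-- A-side helpers: the body of A's first loop (one (node, ranking-value) pair) and of the
-- innermost statement of A's second loop.
def pvA_step (nr : PySem.Dict String (PySem.Dict Int (PySem.Dict String Int))) (kv : String × Int) :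
    PySem.Dict String (PySem.Dict Int (PySem.Dict String Int)) :=
  if nr.contains kv.1 = false then
    nr.insert kv.1 ((PySem.Dict.empty).insert 0 (((PySem.Dict.empty).insert "min" kv.2).insert "max" kv.2))
  else
    let dk := nr.getD kv.1 PySem.Dict.empty
    -- Python max(keys): keys are nonempty here, totalised with .getD 0
    let keyMax := (PySem.List.max? dk.keys id).getD 0
    if kv.2 < (dk.getD keyMax PySem.Dict.empty).getD "min" 0 then
      nr.insert kv.1 (dk.insert (keyMax + 1) (((PySem.Dict.empty).insert "min" kv.2).insert "max" kv.2))
    else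
      nr.insert kv.1 (dk.insert keyMax ((dk.getD keyMax PySem.Dict.empty).insert "max"
        (max kv.2 ((dk.getD keyMax PySem.Dict.empty).getD "max" 0))))

def pvA_scoreStep (dk : PySem.Dict Int (PySem.Dict String Int)) (k : String)
    (sc : PySem.Dict String Int) (i j : Int) : PySem.Dict String Int :=
  if sc.contains k = false then
    sc.insert k ((dk.getD i PySem.Dict.empty).getD "min" 0 - (dk.getD j PySem.Dict.empty).getD "max" 0)
  else
    sc.insert k (min (sc.getD k 0) ((dk.getD i PySem.Dict.empty).getD "min" 0 - (dk.getD j PySem.Dict.empty).getD "max" 0))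

def calc_displacement_in_all_version_ranking_down (node2ranking_each_mml_version : List (String × List (String × Int))) : List (String × Int) :=
  -- the Python parameter is a dict of dicts: decode the association list as Python's dict
  let d : PySem.Dict String (PySem.Dict String Int) :=
    PySem.Dict.ofList (node2ranking_each_mml_version.map (fun p => (p.1, PySem.Dict.ofList p.2)))
  let node2ranking :=
    d.keys.foldl (fun nr version => ((d.getD version PySem.Dict.empty).items).foldl pvA_step nr) PySem.Dict.empty
  let node2score :=
    node2ranking.keys.foldl (fun sc k =>
      let dk := node2ranking.getD k PySem.Dict.empty
      dk.keys.foldl (fun sc i =>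
        (PySem.List.pyRange i (dk.keys.length : Int) 1).foldl (fun sc j => pvA_scoreStep dk k sc i j) sc) sc)
      PySem.Dict.empty
  node2score.items

-- ===== PORT B =====
-- B-side helpers (Source B's _group_values / _segments / _best_displacement)
def pvB_group (d : PySem.Dict String (PySem.Dict String Int)) : PySem.Dict String (List Int) :=
  d.values.foldl (fun nv ranking =>
    ranking.items.foldl (fun nv kv => nv.modify kv.1 [] (fun l => l ++ [kv.2])) nv) PySem.Dict.empty

def pvB_segStep (segs : List (Int × Int)) (v : Int) : List (Int × Int) :=
  match segs.getLast? with
  | some last => if last.1 ≤ v then (if last.2 < v then segs.dropLast ++ [(last.1, v)] else segs) else segs ++ [(v, v)]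
  | none => segs ++ [(v, v)]

def pvB_segments (vals : List Int) : List (Int × Int) := vals.foldl pvB_segStep []

def pvB_bestStep (st : Option Int × Option Int) (seg : Int × Int) : Option Int × Option Int :=
  let prefmin := match st.1 with | none => seg.1 | some m => min m seg.1
  let dd := prefmin - seg.2
  let best := match st.2 with | none => dd | some b => min b dd
  (some prefmin, some best)

def pvB_best (segs : List (Int × Int)) : Option Int := (segs.foldl pvB_bestStep (none, none)).2

def calc_displacement_in_all_version_ranking_down_alt (node2ranking_each_mml_version : List (String × List (String × Int))) : List (String × Int) :=
  let d : PySem.Dict String (PySem.Dict String Int) :=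
    PySem.Dict.ofList (node2ranking_each_mml_version.map (fun p => (p.1, PySem.Dict.ofList p.2)))
  -- Source B stores the best (an int: every grouped value list is nonempty); totalised with .getD 0
  ((pvB_group d).items.foldl (fun sc kvals =>
      sc.insert kvals.1 ((pvB_best (pvB_segments kvals.2)).getD 0)) PySem.Dict.empty).items

-- ===== PRECONDITION & SPEC =====
def Spec_calc_displacement_in_all_version_ranking_down (node2ranking_each_mml_version : List (String × List (String × Int))) (out : List (String × Int)) : Prop := out = calc_displacement_in_all_version_ranking_down_alt node2ranking_each_mml_version
instance (node2ranking_each_mml_version : List (String × List (String × Int))) (out : List (String × Int)) : Decidable (Spec_calc_displacement_in_all_version_ranking_down node2ranking_each_mml_version out) := by unfold Spec_calc_displacement_in_all_version_ranking_down; infer_instance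

-- ===== CLAIM (what is proved, stated in full; the proofs are below) =====
def Claim_equal_calc_displacement_in_all_version_ranking_down : Prop := ∀ (node2ranking_each_mml_version : List (String × List (String × Int))), Dom_calc_displacement_in_all_version_ranking_down node2ranking_each_mml_version → Spec_calc_displacement_in_all_version_ranking_down node2ranking_each_mml_version (calc_displacement_in_all_version_ranking_down node2ranking_each_mml_version)

-- ===== LEMMAS AND PROOFS =====

def pvMM (mn mx : Int) : PySem.Dict String Int := PySem.Dict.mk [("min", mn), ("max", mx)]

def pvEnc (segs : List (Int × Int)) : PySem.Dict Int (PySem.Dict String Int) :=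
  PySem.Dict.mk (segs.zipIdx.map (fun p => ((p.2 : Int), pvMM p.1.1 p.1.2)))

theorem pvEnc_keys (segs : List (Int × Int)) :
    (pvEnc segs).keys = PySem.List.pyRange 0 (segs.length : Int) 1 := by
  show (segs.zipIdx.map (fun p => ((p.2 : Int), pvMM p.1.1 p.1.2))).map Prod.fst = _
  rw [PySem.List.pyRange_zero_nat]
  rw [List.map_map]
  have : (Prod.fst ∘ fun p : (Int × Int) × Nat => ((p.2 : Int), pvMM p.1.1 p.1.2))
       = (fun k : Nat => (k : Int)) ∘ Prod.snd := rfl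
  rw [this, ← List.map_map, List.zipIdx_map_snd, List.range_eq_range']

theorem pvEnc_nodup_keys (segs : List (Int × Int)) : (pvEnc segs).keys.Nodup := by
  rw [pvEnc_keys]; exact PySem.List.nodup_pyRange_one 0 _

theorem pvEnc_get? (segs : List (Int × Int)) (i : Nat) (h : i < segs.length) :
    (pvEnc segs).get? (i : Int) = some (pvMM (segs.getD i (0,0)).1 (segs.getD i (0,0)).2) := by
  apply PySem.Dict.get?_of_mem_items _ _ (pvEnc_nodup_keys segs)
  show _ ∈ (segs.zipIdx.map _)
  have hz : i < segs.zipIdx.length := by simpa using h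
  have : ((i:Int), pvMM (segs.getD i (0,0)).1 (segs.getD i (0,0)).2)
      = (fun p : (Int × Int) × Nat => ((p.2 : Int), pvMM p.1.1 p.1.2)) (segs.zipIdx[i]) := by
    rw [List.getElem_zipIdx]; simp [List.getElem?_eq_getElem h]
  rw [this]
  exact List.mem_map_of_mem (List.getElem_mem hz)

theorem max?_append_one (xs : List Int) (x : Int) :
    PySem.List.max? (xs ++ [x]) id = some (match PySem.List.max? xs id with
      | none => x | some m => if m < x then x else m) := by
  simp only [PySem.List.max?, List.foldl_append, List.foldl_cons, List.foldl_nil]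
  generalize List.foldl _ none xs = r
  cases r <;> (dsimp only [id]; (try split)) <;> rfl

theorem max?_pyRange (n : Nat) (h : 0 < n) :
    PySem.List.max? (PySem.List.pyRange 0 (n : Int) 1) id = some ((n : Int) - 1) := by
  induction n with
  | zero => omega
  | succ m ih =>
    rcases Nat.eq_zero_or_pos m with hm | hm
    · subst hm; simp [PySem.List.max?, PySem.List.pyRange_one_cons (by norm_num : (0:Int) < 1),
        PySem.List.pyRange_one_eq_nil (by norm_num : (1:Int) ≤ 1)]
    · have : ((m+1 : Nat) : Int) = (m : Int) + 1 := by push_cast; ring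
      rw [this, PySem.List.pyRange_one_succ_right (by positivity), max?_append_one, ih hm]
      dsimp only
      rw [if_pos (by omega : (m:Int) - 1 < (m:Int))]
      congr 1
      omega

theorem pvEnc_max? (segs : List (Int × Int)) (h : segs ≠ []) :
    PySem.List.max? (pvEnc segs).keys id = some ((segs.length : Int) - 1) := by
  rw [pvEnc_keys]
  exact max?_pyRange segs.length (List.length_pos_of_ne_nil h)

theorem pvEnc_contains_len (segs : List (Int × Int)) :
    (pvEnc segs).contains (segs.length : Int) = false := by
  rw [PySem.Dict.contains_eq_isSome_get?]
  have : (pvEnc segs).get? (segs.length : Int) = none := by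
    rw [PySem.Dict.get?_eq_none_iff_not_mem_keys, pvEnc_keys]
    intro hmem
    rw [PySem.List.mem_pyRange_one] at hmem
    omega
  rw [this]; rfl

theorem pvEnc_insert_append (segs : List (Int × Int)) (v w : Int) :
    (pvEnc segs).insert (segs.length : Int) (pvMM v w) = pvEnc (segs ++ [(v, w)]) := by
  apply PySem.Dict.ext
  rw [PySem.Dict.items_insert_of_not_contains _ _ (pvEnc_contains_len segs)]
  show (segs.zipIdx.map _) ++ _ = ((segs ++ [(v,w)]).zipIdx.map _)
  rw [List.zipIdx_append, List.map_append]
  simp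

theorem pvEnc_contains_of_lt (segs : List (Int × Int)) (i : Nat) (h : i < segs.length) :
    (pvEnc segs).contains (i : Int) = true := by
  rw [PySem.Dict.contains_eq_isSome_get?, pvEnc_get? segs i h]; rfl

theorem pvEnc_insert_last (s0 : List (Int × Int)) (mn mx w : Int) :
    (pvEnc (s0 ++ [(mn, mx)])).insert (((s0 ++ [(mn, mx)]).length : Int) - 1) (pvMM mn w)
      = pvEnc (s0 ++ [(mn, w)]) := by
  have hl : ((s0 ++ [(mn, mx)]).length : Int) - 1 = (s0.length : Nat) := by
    simp
  rw [hl]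
  apply PySem.Dict.ext
  rw [PySem.Dict.items_insert_of_contains _ _ (pvEnc_contains_of_lt _ s0.length (by simp))]
  show ((s0 ++ [(mn,mx)]).zipIdx.map _).map _ = ((s0 ++ [(mn,w)]).zipIdx.map _)
  rw [List.zipIdx_append, List.zipIdx_append, List.map_append, List.map_append, List.map_append]
  congr 1
  · rw [List.map_map]
    apply List.map_congr_left
    intro p hp
    have := List.mem_zipIdx hp
    have hne : ((p.2 : Int) == (s0.length : Int)) = false := by
      simp; omega
    simp only [Function.comp_apply, hne]
    rfl
  · simp

def pvVals (l : List (String × Int)) (k : String) : List Int :=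
  (l.filter (fun p => p.1 == k)).map (fun p => p.2)

theorem pvB_segments_append (vs : List Int) (v : Int) :
    pvB_segments (vs ++ [v]) = pvB_segStep (pvB_segments vs) v := by
  simp [pvB_segments, List.foldl_append]

theorem pvB_segStep_ne_nil (segs : List (Int × Int)) (v : Int) : pvB_segStep segs v ≠ [] := by
  unfold pvB_segStep
  cases h : segs.getLast? with
  | none => simp
  | some last =>
    have hne : segs ≠ [] := by intro he; subst he; simp at h
    dsimp only
    split_ifs <;> simp [hne]

theorem pvB_segments_ne_nil (vs : List Int) (h : vs ≠ []) : pvB_segments vs ≠ [] := by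
  induction vs using List.reverseRecOn with
  | nil => exact absurd rfl h
  | append_singleton vs' v _ => rw [pvB_segments_append]; exact pvB_segStep_ne_nil _ _

theorem pvVals_append (l : List (String × Int)) (x : String × Int) (k : String) :
    pvVals (l ++ [x]) k = pvVals l k ++ (if x.1 = k then [x.2] else []) := by
  unfold pvVals
  rw [List.filter_append, List.map_append]
  congr 1
  by_cases hx : x.1 = k <;> simp [hx]

-- the fresh inner dict of A literally is pvEnc of one fresh segment

theorem pvFresh_eq (v : Int) :
    ((PySem.Dict.empty).insert 0 (((PySem.Dict.empty).insert "min" v).insert "max" v)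
      : PySem.Dict Int (PySem.Dict String Int)) = pvEnc [(v, v)] := by
  rfl

-- A's update on an encoded segment list is segStep, encoded

theorem pvA_upd_enc (segs : List (Int × Int)) (hne : segs ≠ []) (v : Int) :
    (let dk := pvEnc segs
     let keyMax := (PySem.List.max? dk.keys id).getD 0
     if v < (dk.getD keyMax PySem.Dict.empty).getD "min" 0 then
       dk.insert (keyMax + 1) (((PySem.Dict.empty).insert "min" v).insert "max" v)
     else
       dk.insert keyMax ((dk.getD keyMax PySem.Dict.empty).insert "max"
         (max v ((dk.getD keyMax PySem.Dict.empty).getD "max" 0))))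
    = pvEnc (pvB_segStep segs v) := by
  obtain ⟨s0, last, rfl⟩ : ∃ s0 last, segs = s0 ++ [last] :=
    ⟨_, _, (List.dropLast_append_getLast hne).symm⟩
  obtain ⟨mn, mx⟩ := last
  have hn : ((s0 ++ [(mn, mx)]).length : Int) = (s0.length : Int) + 1 := by simp
  have hkm : (PySem.List.max? (pvEnc (s0 ++ [(mn, mx)])).keys id).getD 0 = (s0.length : Int) := by
    rw [pvEnc_max? _ (by simp)]; simp
  have hget : (pvEnc (s0 ++ [(mn, mx)])).getD ((s0.length : Nat) : Int) PySem.Dict.empty = pvMM mn mx := by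
    rw [PySem.Dict.getD_eq_get?_getD, pvEnc_get? _ s0.length (by simp)]
    simp
  dsimp only
  rw [hkm]
  rw [show ((s0.length : Nat) : Int) = (s0.length : Int) from rfl] at hget
  rw [hget]
  have hmin : (pvMM mn mx).getD "min" 0 = mn := rfl
  have hmax : (pvMM mn mx).getD "max" 0 = mx := rfl
  rw [hmin, hmax]
  unfold pvB_segStep
  rw [List.getLast?_concat]
  dsimp only
  by_cases hv : v < mn
  · rw [if_pos hv, if_neg (by omega)]
    have : (s0.length : Int) + 1 = ((s0 ++ [(mn, mx)]).length : Int) := by simp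
    rw [this]
    rw [show (((PySem.Dict.empty).insert "min" v).insert "max" v : PySem.Dict String Int) = pvMM v v from rfl]
    rw [pvEnc_insert_append]
  · rw [if_neg hv, if_pos (by omega)]
    rw [show ((pvMM mn mx).insert "max" (max v mx) : PySem.Dict String Int) = pvMM mn (max v mx) from rfl]
    have hil : (pvEnc (s0 ++ [(mn, mx)])).insert (s0.length : Int) (pvMM mn (max v mx))
        = pvEnc (s0 ++ [(mn, max v mx)]) := by
      have h2 := pvEnc_insert_last s0 mn mx (max v mx)
      rwa [show (((s0 ++ [(mn, mx)]).length : Int) - 1) = (s0.length : Int) from by simp] at h2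
    rw [hil]
    by_cases hmxv : mx < v
    · rw [if_pos hmxv, List.dropLast_concat, show max v mx = v from by omega]
    · rw [if_neg hmxv, show max v mx = mx from by omega]

def pvA_upd (nr : PySem.Dict String (PySem.Dict Int (PySem.Dict String Int))) (kv : String × Int) :
    PySem.Dict Int (PySem.Dict String Int) :=
  if nr.contains kv.1 = false then
    (PySem.Dict.empty).insert 0 (((PySem.Dict.empty).insert "min" kv.2).insert "max" kv.2)
  else
    let dk := nr.getD kv.1 PySem.Dict.empty
    let keyMax := (PySem.List.max? dk.keys id).getD 0
    if kv.2 < (dk.getD keyMax PySem.Dict.empty).getD "min" 0 then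
      dk.insert (keyMax + 1) (((PySem.Dict.empty).insert "min" kv.2).insert "max" kv.2)
    else
      dk.insert keyMax ((dk.getD keyMax PySem.Dict.empty).insert "max"
        (max kv.2 ((dk.getD keyMax PySem.Dict.empty).getD "max" 0)))

theorem pvA_step_eq_insert (nr : PySem.Dict String (PySem.Dict Int (PySem.Dict String Int)))
    (kv : String × Int) : pvA_step nr kv = nr.insert kv.1 (pvA_upd nr kv) := by
  unfold pvA_step pvA_upd
  by_cases h : nr.contains kv.1 = false
  · rw [if_pos h, if_pos h]
  · rw [if_neg h, if_neg h]
    dsimp only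
    split_ifs <;> rfl

theorem pvA_fold_get? (l : List (String × Int)) (k : String) :
    (l.foldl pvA_step PySem.Dict.empty).get? k =
      if pvVals l k = [] then none else some (pvEnc (pvB_segments (pvVals l k))) := by
  induction l using List.reverseRecOn with
  | nil => simp [pvVals, PySem.Dict.get?_empty]
  | append_singleton l x ih =>
    rw [List.foldl_append, List.foldl_cons, List.foldl_nil, pvA_step_eq_insert, pvVals_append]
    by_cases hx : x.1 = k
    · rw [hx, PySem.Dict.get?_insert_self]
      simp only [if_true]
      rw [if_neg (by simp)]
      unfold pvA_upd
      rw [hx, PySem.Dict.contains_eq_isSome_get?, ih]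
      by_cases hv : pvVals l k = []
      · rw [if_pos hv, hv]
        simp only [Option.isSome_none, if_true]
        exact congrArg some (by rw [pvFresh_eq]; rfl)
      · rw [if_neg hv]
        simp only [Option.isSome_some]
        rw [if_neg (by simp)]
        rw [PySem.Dict.getD_eq_get?_getD (List.foldl pvA_step PySem.Dict.empty l) k PySem.Dict.empty, ih, if_neg hv]
        have hsne : pvB_segments (pvVals l k) ≠ [] := pvB_segments_ne_nil _ hv
        have := pvA_upd_enc (pvB_segments (pvVals l k)) hsne x.2
        dsimp only at this
        rw [show ((some (pvEnc (pvB_segments (pvVals l k)))).getD PySem.Dict.empty)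
              = pvEnc (pvB_segments (pvVals l k)) from rfl]
        rw [this, pvB_segments_append]
    · rw [PySem.Dict.get?_insert_of_ne _ _ (fun he => hx he.symm), ih]
      simp [hx]

theorem pvA_fold_keys (l : List (String × Int)) :
    (l.foldl pvA_step PySem.Dict.empty).keys = PySem.Set.ofList (l.map (fun p => p.1)) := by
  have hfun : pvA_step = fun d x => d.insert x.1 (pvA_upd d x) :=
    funext fun d => funext fun x => pvA_step_eq_insert d x
  rw [hfun]
  have := PySem.Dict.keys_foldl_insert_key l (fun p => p.1) pvA_upd PySem.Dict.empty
  simpa using this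

def pvScMinStep (k : String) (sc : PySem.Dict String Int) (x : Int) : PySem.Dict String Int :=
  if sc.contains k = false then sc.insert k x else sc.insert k (min (sc.getD k 0) x)

theorem pvScMin_fold_ins (k : String) (t : List Int) :
    ∀ (m : Int) (sc : PySem.Dict String Int),
      t.foldl (pvScMinStep k) (sc.insert k m) = sc.insert k (t.foldl min m) := by
  induction t with
  | nil => intro m sc; rfl
  | cons x t ih =>
    intro m sc
    rw [List.foldl_cons, List.foldl_cons]
    have h1 : pvScMinStep k (sc.insert k m) x = sc.insert k (min m x) := by
      unfold pvScMinStep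
      rw [PySem.Dict.contains_insert_self]
      simp only [Bool.true_eq_false, if_false]
      rw [PySem.Dict.getD_insert_self, PySem.Dict.insert_insert_self]
    rw [h1, ih]

theorem pvScMin_fold (k : String) (h0 : Int) (t : List Int) (sc : PySem.Dict String Int)
    (h : sc.contains k = false) :
    (h0 :: t).foldl (pvScMinStep k) sc = sc.insert k (((h0 :: t).min?).getD 0) := by
  rw [List.foldl_cons]
  have h1 : pvScMinStep k sc h0 = sc.insert k h0 := by unfold pvScMinStep; rw [h]; simp
  rw [h1, pvScMin_fold_ins]
  rfl

def pvLA (segs : List (Int × Int)) : List Int :=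
  (PySem.List.pyRange 0 (segs.length : Int) 1).flatMap (fun i =>
    (PySem.List.pyRange i (segs.length : Int) 1).map (fun j =>
      (segs.getD i.toNat (0,0)).1 - (segs.getD j.toNat (0,0)).2))

theorem pvLA_ne_nil (segs : List (Int × Int)) (h : segs ≠ []) : pvLA segs ≠ [] := by
  unfold pvLA
  have hn : (0 : Int) < (segs.length : Int) := by
    have := List.length_pos_of_ne_nil h; omega
  rw [PySem.List.pyRange_one_cons hn, List.flatMap_cons, PySem.List.pyRange_one_cons hn]
  simp

theorem pvEnc_getD_minmax (segs : List (Int × Int)) (i : Int) (h0 : 0 ≤ i)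
    (h1 : i < (segs.length : Int)) :
    ((pvEnc segs).getD i PySem.Dict.empty).getD "min" 0 = (segs.getD i.toNat (0,0)).1
    ∧ ((pvEnc segs).getD i PySem.Dict.empty).getD "max" 0 = (segs.getD i.toNat (0,0)).2 := by
  have hi : i = ((i.toNat : Nat) : Int) := by omega
  have hlt : i.toNat < segs.length := by omega
  rw [hi, PySem.Dict.getD_eq_get?_getD (pvEnc segs) ((i.toNat : Nat) : Int) PySem.Dict.empty,
    pvEnc_get? segs i.toNat hlt]
  exact ⟨rfl, rfl⟩

theorem pvA_scoreStep_eq (segs : List (Int × Int)) (k : String) (sc : PySem.Dict String Int)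
    (i j : Int) (h0 : 0 ≤ i) (h1 : i < (segs.length : Int)) (h2 : 0 ≤ j) (h3 : j < (segs.length : Int)) :
    pvA_scoreStep (pvEnc segs) k sc i j
      = pvScMinStep k sc ((segs.getD i.toNat (0,0)).1 - (segs.getD j.toNat (0,0)).2) := by
  unfold pvA_scoreStep pvScMinStep
  rw [(pvEnc_getD_minmax segs i h0 h1).1, (pvEnc_getD_minmax segs j h2 h3).2]

theorem pvA_scoreLoop_eq (segs : List (Int × Int)) (k : String) (sc : PySem.Dict String Int) :
    ((pvEnc segs).keys.foldl (fun sc i =>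
        (PySem.List.pyRange i ((pvEnc segs).keys.length : Int) 1).foldl
          (fun sc j => pvA_scoreStep (pvEnc segs) k sc i j) sc) sc)
      = (pvLA segs).foldl (pvScMinStep k) sc := by
  rw [pvEnc_keys]
  have hlen : ((PySem.List.pyRange 0 (segs.length : Int) 1).length : Int) = (segs.length : Int) := by
    rw [PySem.List.length_pyRange_one]; omega
  rw [hlen]
  unfold pvLA
  rw [List.foldl_flatMap]
  apply PySem.List.foldl_congr_mem
  intro acc i hi
  rw [List.foldl_map]
  apply PySem.List.foldl_congr_mem
  intro acc' j hj
  rw [PySem.List.mem_pyRange_one] at hi hj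
  exact pvA_scoreStep_eq segs k acc' i j hi.1 hi.2 (le_trans hi.1 hj.1) hj.2

def pvLB : Option Int → List (Int × Int) → List Int
  | _, [] => []
  | p, s :: rest =>
    (((match p with | none => s.1 | some q => min q s.1) : Int) - s.2) ::
      pvLB (some (match p with | none => s.1 | some q => min q s.1)) rest

theorem pvB_bfold (segs : List (Int × Int)) :
    ∀ (p : Option Int) (b : Int),
      (segs.foldl pvB_bestStep (p, some b)).2 = some ((pvLB p segs).foldl min b) := by
  induction segs with
  | nil => intro p b; rfl
  | cons s rest ih =>
    intro p b
    rw [List.foldl_cons]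
    have hstep : pvB_bestStep (p, some b) s
        = (some (match p with | none => s.1 | some q => min q s.1),
           some (min b ((match p with | none => s.1 | some q => min q s.1) - s.2))) := by
      cases p <;> rfl
    rw [hstep, ih]
    rfl

theorem pvB_best_eq_min? (segs : List (Int × Int)) :
    pvB_best segs = (pvLB none segs).min? := by
  cases segs with
  | nil => rfl
  | cons s rest =>
    unfold pvB_best
    rw [List.foldl_cons]
    have hstep : pvB_bestStep (none, none) s = (some s.1, some (s.1 - s.2)) := rfl
    rw [hstep, pvB_bfold]
    show _ = ((s.1 - s.2) :: pvLB (some s.1) rest).min?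
    rw [List.min?_cons']

theorem pvMin_app (l : List Int) (a : Int) :
    (l ++ [a]).min? = some (match l.min? with | none => a | some m => min m a) := by
  cases l with
  | nil => rfl
  | cons x xs =>
    rw [List.cons_append, List.min?_cons', List.min?_cons', List.foldl_append]
    rfl

theorem pvLB_gen : ∀ (rest done : List (Int × Int)),
    pvLB ((done.map (fun s => s.1)).min?) rest
      = (List.range rest.length).map (fun t =>
          ((((done ++ rest.take (t+1)).map (fun s => s.1)).min?).getD 0) - (rest.getD t (0,0)).2) := by
  intro rest
  induction rest with
  | nil => intro done; rfl
  | cons s rest ih =>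
    intro done
    have hm : ((done.map (fun s => s.1)) ++ [s.1]).min?
        = some (match (done.map (fun s => s.1)).min? with | none => s.1 | some q => min q s.1) :=
      pvMin_app _ _
    have ih' := ih (done ++ [s])
    simp only [List.map_append, List.map_cons, List.map_nil] at ih'
    show (((match (done.map (fun s => s.1)).min? with | none => s.1 | some q => min q s.1) : Int) - s.2) ::
        pvLB (some (match (done.map (fun s => s.1)).min? with | none => s.1 | some q => min q s.1)) rest = _
    rw [← hm, ih']
    rw [List.length_cons, List.range_succ_eq_map, List.map_cons]
    congr 1
    · show (match (done.map (fun s => s.1)).min? with | none => s.1 | some q => min q s.1) - s.2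
          = ((done ++ (s :: rest).take 1).map (fun s => s.1)).min?.getD 0 - ((s :: rest).getD 0 (0,0)).2
      have h1 : (done ++ (s :: rest).take 1).map (fun s => s.1) = done.map (fun s => s.1) ++ [s.1] := by
        simp
      rw [h1, hm]
      rfl
    · rw [List.map_map]
      apply List.map_congr_left
      intro t _
      simp only [Function.comp_apply]
      have hl : (done ++ (s :: rest).take (t.succ + 1)).map (fun s => s.1)
          = done.map (fun s => s.1) ++ [s.1] ++ (rest.take (t+1)).map (fun s => s.1) := by
        simp [List.take_succ_cons]
      rw [hl]
      rfl

theorem pvLB_spec (segs : List (Int × Int)) :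
    pvLB none segs = (List.range segs.length).map (fun t =>
      ((((segs.take (t+1)).map (fun s => s.1)).min?).getD 0) - (segs.getD t (0,0)).2) := by
  have := pvLB_gen segs []
  simpa using this

theorem pvMemLA (segs : List (Int × Int)) (i j : Nat) (hij : i ≤ j) (hj : j < segs.length) :
    (segs.getD i (0,0)).1 - (segs.getD j (0,0)).2 ∈ pvLA segs := by
  unfold pvLA
  rw [List.mem_flatMap]
  refine ⟨(i : Int), ?_, ?_⟩
  · rw [PySem.List.mem_pyRange_one]; omega
  · rw [List.mem_map]
    refine ⟨(j : Int), ?_, ?_⟩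
    · rw [PySem.List.mem_pyRange_one]; omega
    · simp

theorem pvMemLA_elim (segs : List (Int × Int)) (x : Int) (hx : x ∈ pvLA segs) :
    ∃ i j : Nat, i ≤ j ∧ j < segs.length ∧ x = (segs.getD i (0,0)).1 - (segs.getD j (0,0)).2 := by
  unfold pvLA at hx
  rw [List.mem_flatMap] at hx
  obtain ⟨i, hi, hx⟩ := hx
  rw [List.mem_map] at hx
  obtain ⟨j, hj, rfl⟩ := hx
  rw [PySem.List.mem_pyRange_one] at hi hj
  exact ⟨i.toNat, j.toNat, by omega, by omega, rfl⟩

theorem pvTake_min?_some (segs : List (Int × Int)) (j : Nat) (hj : j < segs.length) :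
    ∃ m, ((segs.take (j+1)).map (fun s => s.1)).min? = some m := by
  have hne : (segs.take (j+1)).map (fun s => s.1) ≠ [] := by
    simp only [ne_eq, List.map_eq_nil_iff, List.take_eq_nil_iff]
    push Not
    constructor <;> first | omega | (intro he; subst he; simp at hj)
  cases h : (segs.take (j+1)).map (fun s => s.1) with
  | nil => exact absurd h hne
  | cons a l => exact ⟨_, List.min?_cons'⟩

theorem pvMemLB (segs : List (Int × Int)) (j : Nat) (hj : j < segs.length) :
    ((((segs.take (j+1)).map (fun s => s.1)).min?).getD 0) - (segs.getD j (0,0)).2 ∈ pvLB none segs := by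
  rw [pvLB_spec, List.mem_map]
  exact ⟨j, List.mem_range.mpr hj, rfl⟩

theorem pvMemLB_elim (segs : List (Int × Int)) (x : Int) (hx : x ∈ pvLB none segs) :
    ∃ j : Nat, j < segs.length ∧
      x = ((((segs.take (j+1)).map (fun s => s.1)).min?).getD 0) - (segs.getD j (0,0)).2 := by
  rw [pvLB_spec, List.mem_map] at hx
  obtain ⟨j, hj, rfl⟩ := hx
  exact ⟨j, List.mem_range.mp hj, rfl⟩

theorem pvFst_mem_take (segs : List (Int × Int)) (i j : Nat) (hij : i ≤ j) (hj : j < segs.length) :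
    (segs.getD i (0,0)).1 ∈ (segs.take (j+1)).map (fun s => s.1) := by
  rw [List.mem_map]
  have hi : i < (segs.take (j+1)).length := by
    rw [List.length_take]; omega
  refine ⟨(segs.take (j+1))[i], List.getElem_mem hi, ?_⟩
  rw [List.getElem_take, List.getD_eq_getElem _ _ (by omega : i < segs.length)]

theorem pvTake_mem_elim (segs : List (Int × Int)) (j : Nat) (hj : j < segs.length) (m : Int)
    (hm : m ∈ (segs.take (j+1)).map (fun s => s.1)) :
    ∃ i : Nat, i ≤ j ∧ i < segs.length ∧ m = (segs.getD i (0,0)).1 := by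
  rw [List.mem_map] at hm
  obtain ⟨p, hp, rfl⟩ := hm
  rw [List.mem_iff_getElem] at hp
  obtain ⟨i, hi, hp⟩ := hp
  rw [List.length_take] at hi
  have hi2 : i < segs.length := by omega
  refine ⟨i, by omega, hi2, ?_⟩
  rw [← hp, List.getElem_take, List.getD_eq_getElem _ _ hi2]

theorem pvMin_LA_LB (segs : List (Int × Int)) (h : segs ≠ []) :
    (pvLA segs).min? = (pvLB none segs).min? := by
  have hn : 0 < segs.length := List.length_pos_of_ne_nil h
  obtain ⟨mA, hmA⟩ : ∃ m, (pvLA segs).min? = some m := by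
    cases hLA : pvLA segs with
    | nil => exact absurd hLA (pvLA_ne_nil segs h)
    | cons a l => exact ⟨_, List.min?_cons'⟩
  obtain ⟨mB, hmB⟩ : ∃ m, (pvLB none segs).min? = some m := by
    cases hLB : pvLB none segs with
    | nil =>
      exfalso
      rw [pvLB_spec] at hLB
      simp only [List.map_eq_nil_iff, List.range_eq_nil] at hLB
      omega
    | cons a l => exact ⟨_, List.min?_cons'⟩
  obtain ⟨hmA_mem, hmA_le⟩ := List.min?_eq_some_iff.mp hmA
  obtain ⟨hmB_mem, hmB_le⟩ := List.min?_eq_some_iff.mp hmB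
  rw [hmA, hmB]
  have h1 : mB ≤ mA := by
    obtain ⟨i, j, hij, hj, rfl⟩ := pvMemLA_elim segs mA hmA_mem
    obtain ⟨m, hm⟩ := pvTake_min?_some segs j hj
    have hmle : m ≤ (segs.getD i (0,0)).1 :=
      (List.min?_eq_some_iff.mp hm).2 _ (pvFst_mem_take segs i j hij hj)
    have hLBj := pvMemLB segs j hj
    rw [hm] at hLBj
    calc mB ≤ (some m).getD 0 - (segs.getD j (0,0)).2 := hmB_le _ hLBj
      _ ≤ (segs.getD i (0,0)).1 - (segs.getD j (0,0)).2 := by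
          show m - _ ≤ _
          omega
  have h2 : mA ≤ mB := by
    obtain ⟨j, hj, rfl⟩ := pvMemLB_elim segs mB hmB_mem
    obtain ⟨m, hm⟩ := pvTake_min?_some segs j hj
    obtain ⟨i, hij, hi, hmi⟩ := pvTake_mem_elim segs j hj m (List.min?_mem hm)
    rw [hm]
    show mA ≤ m - _
    rw [hmi]
    exact hmA_le _ (pvMemLA segs i j hij hj)
  exact congrArg some (le_antisymm h2 h1)

theorem pvVals_ne_nil_of_mem (l : List (String × Int)) (k : String)
    (h : k ∈ l.map (fun p => p.1)) : pvVals l k ≠ [] := by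
  obtain ⟨p, hp, rfl⟩ := List.mem_map.mp h
  unfold pvVals
  intro he
  rw [List.map_eq_nil_iff] at he
  have : p ∈ l.filter (fun q => q.1 == p.1) := List.mem_filter.mpr ⟨hp, by simp⟩
  rw [he] at this
  exact absurd this (List.not_mem_nil)

theorem pvA_getD_enc (l : List (String × Int)) (k : String) (h : pvVals l k ≠ []) :
    (l.foldl pvA_step PySem.Dict.empty).getD k PySem.Dict.empty
      = pvEnc (pvB_segments (pvVals l k)) := by
  rw [PySem.Dict.getD_eq_get?_getD (l.foldl pvA_step PySem.Dict.empty) k PySem.Dict.empty,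
    pvA_fold_get?, if_neg h]
  rfl

theorem pvA_outer (l : List (String × Int)) :
    ∀ (K : List String) (sc : PySem.Dict String Int), K.Nodup →
    (∀ k ∈ K, sc.contains k = false) → (∀ k ∈ K, k ∈ l.map (fun p => p.1)) →
    (K.foldl (fun sc k =>
        let dk := (l.foldl pvA_step PySem.Dict.empty).getD k PySem.Dict.empty
        dk.keys.foldl (fun sc i => (PySem.List.pyRange i (dk.keys.length : Int) 1).foldl
          (fun sc j => pvA_scoreStep dk k sc i j) sc) sc) sc).items
      = sc.items ++ K.map (fun k => (k, ((pvLA (pvB_segments (pvVals l k))).min?).getD 0)) := by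
  intro K
  induction K with
  | nil => intro sc _ _ _; simp
  | cons k0 K ih =>
    intro sc hnd hc hmem
    rw [List.foldl_cons]
    have hvals : pvVals l k0 ≠ [] := pvVals_ne_nil_of_mem l k0 (hmem k0 (by simp))
    have hsegs : pvB_segments (pvVals l k0) ≠ [] := pvB_segments_ne_nil _ hvals
    have hbody : (let dk := (l.foldl pvA_step PySem.Dict.empty).getD k0 PySem.Dict.empty
        dk.keys.foldl (fun sc i => (PySem.List.pyRange i (dk.keys.length : Int) 1).foldl
          (fun sc j => pvA_scoreStep dk k0 sc i j) sc) sc)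
        = sc.insert k0 (((pvLA (pvB_segments (pvVals l k0))).min?).getD 0) := by
      dsimp only
      rw [pvA_getD_enc l k0 hvals, pvA_scoreLoop_eq]
      cases hLA : pvLA (pvB_segments (pvVals l k0)) with
      | nil => exact absurd hLA (pvLA_ne_nil _ hsegs)
      | cons a t => rw [pvScMin_fold k0 a t sc (hc k0 (by simp))]
    rw [hbody, ih _ (by exact (List.nodup_cons.mp hnd).2)
      (by
        intro k' hk'
        rw [PySem.Dict.contains_insert]
        have h1 : (k' == k0) = false := by
          have := (List.nodup_cons.mp hnd).1
          simp only [beq_eq_false_iff_ne, ne_eq]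
          intro he; subst he; exact this hk'
        rw [h1, hc k' (by simp [hk'])]
        rfl)
      (fun k' hk' => hmem k' (by simp [hk']))]
    rw [PySem.Dict.items_insert_of_not_contains _ _ (hc k0 (by simp))]
    simp

theorem pvB_result_items (L : List (String × Int)) :
    ((L.foldl (fun nv kv => nv.modify kv.1 [] (fun s => s ++ [kv.2])) PySem.Dict.empty).items.foldl
       (fun sc kvals => sc.insert kvals.1 ((pvB_best (pvB_segments kvals.2)).getD 0)) PySem.Dict.empty).items
    = (PySem.Set.ofList (L.map (fun p => p.1))).map
        (fun k => (k, (pvB_best (pvB_segments (pvVals L k))).getD 0)) := by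
  have hkeys : (L.foldl (fun nv kv => nv.modify kv.1 [] (fun s => s ++ [kv.2])) PySem.Dict.empty).keys
      = PySem.Set.ofList (L.map (fun p => p.1)) := by
    have := PySem.Dict.keys_foldl_modify_key L (fun kv => kv.1) ([] : List Int)
      (fun _ kv => (fun s => s ++ [kv.2])) PySem.Dict.empty
    simpa using this
  have hnodup : (L.foldl (fun nv kv => nv.modify kv.1 [] (fun s => s ++ [kv.2])) PySem.Dict.empty).keys.Nodup := by
    exact PySem.Dict.nodup_keys_foldl_modify_key L (fun kv => kv.1) ([] : List Int)
      (fun _ kv => (fun s => s ++ [kv.2])) PySem.Dict.empty (by simp)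
  set nv := L.foldl (fun nv kv => nv.modify kv.1 [] (fun s => s ++ [kv.2])) PySem.Dict.empty with hnv
  rw [PySem.Dict.items_foldl_insert_fresh nv.items (fun kv => kv.1)
    (fun kv => (pvB_best (pvB_segments kv.2)).getD 0) PySem.Dict.empty
    (fun a _ => PySem.Dict.contains_empty a.1)
    (by show (nv.items.map (fun kv => kv.1)).Nodup; exact hnodup)]
  rw [PySem.Dict.items_eq_map_keys nv hnodup [], List.map_map]
  have hgetD : ∀ k, nv.getD k [] = pvVals L k := by
    intro k
    rw [hnv]
    have := PySem.Dict.getD_foldl_modify_append L PySem.Dict.empty k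
    rw [this, PySem.Dict.getD_empty]
    rfl
  rw [hkeys]
  show [] ++ _ = _
  rw [List.nil_append]
  apply List.map_congr_left
  intro k _
  simp only [Function.comp_apply, hgetD k]

theorem pvMain_eq (input : List (String × List (String × Int))) :
    calc_displacement_in_all_version_ranking_down input
      = calc_displacement_in_all_version_ranking_down_alt input := by
  unfold calc_displacement_in_all_version_ranking_down calc_displacement_in_all_version_ranking_down_alt
  dsimp only
  set d : PySem.Dict String (PySem.Dict String Int) :=
    PySem.Dict.ofList (input.map (fun p => (p.1, PySem.Dict.ofList p.2))) with hd
  set L : List (String × Int) := d.values.flatMap (fun r => r.items) with hL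
  have hA1 : d.keys.foldl (fun nr version => ((d.getD version PySem.Dict.empty).items).foldl pvA_step nr) PySem.Dict.empty
      = L.foldl pvA_step PySem.Dict.empty := by
    rw [hL, List.foldl_flatMap, PySem.Dict.values_eq_map_keys d (PySem.Dict.nodup_keys_ofList _) PySem.Dict.empty,
      List.foldl_map]
  have hB1 : pvB_group d = L.foldl (fun nv kv => nv.modify kv.1 [] (fun s => s ++ [kv.2])) PySem.Dict.empty := by
    rw [pvB_group, hL, List.foldl_flatMap]
  rw [hA1, hB1]
  rw [pvB_result_items L]
  rw [pvA_fold_keys L]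
  rw [pvA_outer L (PySem.Set.ofList (L.map (fun p => p.1))) PySem.Dict.empty
    (PySem.Set.nodup_ofList _)
    (fun k _ => PySem.Dict.contains_empty k)
    (fun k hk => (PySem.Set.mem_ofList _ k).mp hk)]
  show [] ++ _ = _
  rw [List.nil_append]
  apply List.map_congr_left
  intro k hk
  have hvals : pvVals L k ≠ [] := pvVals_ne_nil_of_mem L k ((PySem.Set.mem_ofList _ k).mp hk)
  have hsegs : pvB_segments (pvVals L k) ≠ [] := pvB_segments_ne_nil _ hvals
  rw [pvB_best_eq_min?, ← pvMin_LA_LB _ hsegs]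

-- ===== VERDICT (by name: the statement is the Claim_ definition above) =====
theorem calc_displacement_in_all_version_ranking_down_spec : Claim_equal_calc_displacement_in_all_version_ranking_down := by
  intro input _
  unfold Spec_calc_displacement_in_all_version_ranking_down
  exact pvMain_eq input
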